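-- pv_equiv track=rewrite | github.com/wanderer709/Exercises | exercises.py | karaca
-- ===== SOURCE A (Python) =====
-- def karaca(stringer):
--     if stringer.lower() != stringer:
--         return "All letters MUST be lowercase, silly."
--     encrypting = stringer[::-1]
--     karaca_dict = {"a": "0", "e": "1", "i": "2", "o": "2", "u": "3"}
--     for key in karaca_dict:
--         encrypting = encrypting.replace(key, karaca_dict[key])
--     encrypting += "aca"
--     return encrypting
-- ===== SOURCE B (Python) =====
-- def karaca(stringer):
--     if stringer.lower() != stringer:
--         return "All letters MUST be lowercase, silly."
--     acc = "aca"
--     for ch in stringer: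
--         i = "aeiou".find(ch)
--         acc = ("01223"[i] if i >= 0 else ch) + acc
--     return acc
-- ===== Notes on version B (the rewrite author's own statement) =====
-- stated objective: alternative
-- what changed: Instead of reversing the string and running five full-string str.replace passes over a dict of rules, B makes one forward pass with a prepend accumulator: each character is looked up by index in the parallel literals 'aeiou'/'01223' and prepended, so the reversal, the dict and all replace passes disappear.
import Mathlib
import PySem

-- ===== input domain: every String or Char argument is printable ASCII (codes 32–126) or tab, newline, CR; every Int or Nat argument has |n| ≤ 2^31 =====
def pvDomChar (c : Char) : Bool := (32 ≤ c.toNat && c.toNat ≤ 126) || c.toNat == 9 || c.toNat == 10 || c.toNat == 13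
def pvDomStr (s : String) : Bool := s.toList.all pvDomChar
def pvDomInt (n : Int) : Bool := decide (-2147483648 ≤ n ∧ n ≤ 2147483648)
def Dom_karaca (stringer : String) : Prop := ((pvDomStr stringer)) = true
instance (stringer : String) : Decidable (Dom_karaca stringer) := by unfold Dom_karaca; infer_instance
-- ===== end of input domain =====

-- B drops A's reverse + dict + five str.replace passes for one forward pass with a
-- prepend accumulator and an index lookup in the parallel literals "aeiou"/"01223";
-- objective: alternative (same cost, different algorithm).


-- ===== PORT A =====
def karaca (stringer : String) : String :=
  if PySem.Str.lower stringer ≠ stringer then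
    "All letters MUST be lowercase, silly."
  else
    -- stringer[::-1]
    let encrypting := (PySem.Str.slice? stringer none none (-1)).getD ""
    let karaca_dict : PySem.Dict String String :=
      PySem.Dict.ofList [("a", "0"), ("e", "1"), ("i", "2"), ("o", "2"), ("u", "3")]
    -- for key in karaca_dict: encrypting = encrypting.replace(key, karaca_dict[key])
    let encrypting := karaca_dict.keys.foldl
      (fun enc key => PySem.Str.replace enc key (karaca_dict.getD key "")) encrypting
    encrypting ++ "aca"

-- ===== PORT B =====
-- one loop step of Source B: i = "aeiou".find(ch); acc = ("01223"[i] if i >= 0 else ch) + acc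
-- ("01223"[i] is guarded by 0 ≤ i, which Source B guarantees is in range; pyGetD only totalises)
def karacaStep (acc : List Char) (ch : Char) : List Char :=
  let i := PySem.Chars.find "aeiou".toList [ch]
  (if 0 ≤ i then PySem.List.pyGetD "01223".toList i ch else ch) :: acc

def karaca_alt (stringer : String) : String :=
  if PySem.Str.lower stringer ≠ stringer then
    "All letters MUST be lowercase, silly."
  else
    String.ofList (stringer.toList.foldl karacaStep "aca".toList)

-- ===== PRECONDITION & SPEC =====
def Spec_karaca (stringer : String) (out : String) : Prop := out = karaca_alt stringer
instance (stringer : String) (out : String) : Decidable (Spec_karaca stringer out) := by unfold Spec_karaca; infer_instance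

-- ===== CLAIM (what is proved, stated in full; the proofs are below) =====
def Claim_equal_karaca : Prop := ∀ (stringer : String), Dom_karaca stringer → Spec_karaca stringer (karaca stringer)

-- ===== LEMMAS AND PROOFS =====

-- the per-character substitution both programs realise
def pvSubst (c : Char) : Char :=
  if c = 'a' then '0' else if c = 'e' then '1' else if c = 'i' then '2'
  else if c = 'o' then '2' else if c = 'u' then '3' else c

-- replace with a single-character pattern is a character map
lemma replace_go_single (k v : Char) :
    ∀ (l acc : List Char) (fuel : Nat), l.length ≤ fuel →
      PySem.Chars.replace.go [k] [v] fuel l acc =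
        acc.reverse ++ l.map (fun c => if c = k then v else c) := by
  intro l
  induction l with
  | nil =>
      intro acc fuel _
      cases fuel <;> simp [PySem.Chars.replace.go]
  | cons c t ih =>
      intro acc fuel hf
      cases fuel with
      | zero => simp at hf
      | succ fuel =>
        by_cases hc : c = k
        · subst hc
          have h1 : PySem.Chars.replace.go [c] [v] (fuel + 1) (c :: t) acc
              = PySem.Chars.replace.go [c] [v] fuel t ([v].reverse ++ acc) := by
            simp [PySem.Chars.replace.go, List.isPrefixOf]
          rw [h1, ih _ fuel (by simpa using hf)]
          simp
        · have hbe : (k == c) = false := by simp [Ne.symm hc]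
          have h1 : PySem.Chars.replace.go [k] [v] (fuel + 1) (c :: t) acc
              = PySem.Chars.replace.go [k] [v] fuel t (c :: acc) := by
            simp [PySem.Chars.replace.go, List.isPrefixOf, hbe]
          rw [h1, ih _ fuel (by simpa using hf)]
          simp [hc]

lemma replace_single (k v : Char) (cs : List Char) :
    PySem.Chars.replace cs [k] [v] = cs.map (fun c => if c = k then v else c) := by
  unfold PySem.Chars.replace
  rw [if_neg (by simp)]
  exact replace_go_single k v cs [] cs.length le_rfl

-- the composition of A's five single-character substitutions is pvSubst
lemma comp_subst (c : Char) :
    (fun c => if c = 'u' then '3' else c)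
      ((fun c => if c = 'o' then '2' else c)
        ((fun c => if c = 'i' then '2' else c)
          ((fun c => if c = 'e' then '1' else c)
            ((fun c => if c = 'a' then '0' else c) c)))) = pvSubst c := by
  by_cases h1 : c = 'a'
  · subst h1; decide
  · by_cases h2 : c = 'e'
    · subst h2; decide
    · by_cases h3 : c = 'i'
      · subst h3; decide
      · by_cases h4 : c = 'o'
        · subst h4; decide
        · by_cases h5 : c = 'u'
          · subst h5; decide
          · simp [pvSubst, h1, h2, h3, h4, h5]

-- B's loop step emits exactly pvSubst c
lemma karacaStep_eq (acc : List Char) (c : Char) :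
    karacaStep acc c = pvSubst c :: acc := by
  by_cases h1 : c = 'a'
  · subst h1
    rw [karacaStep, show PySem.Chars.find "aeiou".toList ['a'] = 0 from by decide]
    congr 1
  · by_cases h2 : c = 'e'
    · subst h2
      rw [karacaStep, show PySem.Chars.find "aeiou".toList ['e'] = 1 from by decide]
      congr 1
    · by_cases h3 : c = 'i'
      · subst h3
        rw [karacaStep, show PySem.Chars.find "aeiou".toList ['i'] = 2 from by decide]
        congr 1
      · by_cases h4 : c = 'o'
        · subst h4
          rw [karacaStep, show PySem.Chars.find "aeiou".toList ['o'] = 3 from by decide]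
          congr 1
        · by_cases h5 : c = 'u'
          · subst h5
            rw [karacaStep, show PySem.Chars.find "aeiou".toList ['u'] = 4 from by decide]
            congr 1
          · have hfind : PySem.Chars.find "aeiou".toList [c] = -1 := by
              rw [PySem.Chars.find_eq_neg_one_iff]
              intro hinf
              have := hinf.subset (List.mem_singleton_self c)
              simp [h1, h2, h3, h4, h5] at this
            rw [karacaStep, hfind]
            simp [pvSubst, h1, h2, h3, h4, h5]

-- B's fold builds the reversed map
lemma foldl_karacaStep (l acc : List Char) :
    l.foldl karacaStep acc = (l.map pvSubst).reverse ++ acc := by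
  induction l generalizing acc with
  | nil => simp
  | cons c t ih => simp [List.foldl, karacaStep_eq, ih]

-- ===== VERDICT (by name: the statement is the Claim_ definition above) =====
theorem karaca_spec : Claim_equal_karaca := by
  intro stringer _
  unfold Spec_karaca karaca karaca_alt
  by_cases h : PySem.Str.lower stringer ≠ stringer
  · rw [if_pos h, if_pos h]
  · rw [if_neg h, if_neg h]
    rw [← String.toList_inj]
    have hkeys : (PySem.Dict.ofList
        [("a", "0"), ("e", "1"), ("i", "2"), ("o", "2"), ("u", "3")] :
        PySem.Dict String String).keys = ["a", "e", "i", "o", "u"] := by decide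
    simp only [hkeys, List.foldl, PySem.Str.slice?_none_none_neg_one, Option.getD_some]
    rw [show (PySem.Dict.getD (PySem.Dict.ofList
        [("a", "0"), ("e", "1"), ("i", "2"), ("o", "2"), ("u", "3")]) "a" "") = "0" from by decide,
      show (PySem.Dict.getD (PySem.Dict.ofList
        [("a", "0"), ("e", "1"), ("i", "2"), ("o", "2"), ("u", "3")]) "e" "") = "1" from by decide,
      show (PySem.Dict.getD (PySem.Dict.ofList
        [("a", "0"), ("e", "1"), ("i", "2"), ("o", "2"), ("u", "3")]) "i" "") = "2" from by decide,
      show (PySem.Dict.getD (PySem.Dict.ofList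
        [("a", "0"), ("e", "1"), ("i", "2"), ("o", "2"), ("u", "3")]) "o" "") = "2" from by decide,
      show (PySem.Dict.getD (PySem.Dict.ofList
        [("a", "0"), ("e", "1"), ("i", "2"), ("o", "2"), ("u", "3")]) "u" "") = "3" from by decide]
    simp only [String.toList_append, PySem.Str.toList_replace, String.toList_ofList,
      foldl_karacaStep]
    rw [show ("a" : String).toList = ['a'] from rfl, show ("e" : String).toList = ['e'] from rfl,
      show ("i" : String).toList = ['i'] from rfl, show ("o" : String).toList = ['o'] from rfl,
      show ("u" : String).toList = ['u'] from rfl, show ("0" : String).toList = ['0'] from rfl,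
      show ("1" : String).toList = ['1'] from rfl, show ("2" : String).toList = ['2'] from rfl,
      show ("3" : String).toList = ['3'] from rfl]
    simp only [replace_single, List.map_map, Function.comp_def]
    rw [show ("aca" : String).toList = ['a','c','a'] from rfl]
    rw [← List.map_reverse]
    congr 1
    exact List.map_congr_left (fun c _ => comp_subst c)
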